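-- pv_equiv track=rewrite | github.com/ile123/GA-2023 | Vjezba 5/batistic_ilario_v5_helper_functions.py | create_incidence_matrix_from_arcs
-- ===== SOURCE A (Python) =====
-- def create_incidence_matrix_from_arcs(arcs, vertices):
--     incidence_matrix = []
--     arcs.sort()
--     for _ in range(0, vertices):
--         incidence_matrix.append([0] * len(arcs))
--     for index, item in enumerate(arcs):
--         v1 = item[0] if item[0] == 0 else item[0] - 1
--         v2 = item[1] if item[1] == 0 else item[1] - 1
--         incidence_matrix[v1][index] = 1
--         incidence_matrix[v2][index] = 1
--     return incidence_matrix
-- ===== SOURCE B (Python) =====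
-- def create_incidence_matrix_from_arcs(arcs, vertices):
--     arcs.sort()
--     columns = []
--     for a, b in arcs:
--         column = [0] * vertices
--         column[a if a == 0 else a - 1] = 1
--         column[b if b == 0 else b - 1] = 1
--         columns.append(column)
--     return [[column[v] for column in columns] for v in range(vertices)]
-- ===== Notes on version B (the rewrite author's own statement) =====
-- stated objective: alternative
-- what changed: Builds the matrix column-major (one incidence column per arc, then a transpose into rows) instead of A's scatter-writes into a preallocated row-major zero matrix; Pre_ excludes the inputs where both raise IndexError (an arc endpoint whose row index falls outside the vertex range).
import Mathlib
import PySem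

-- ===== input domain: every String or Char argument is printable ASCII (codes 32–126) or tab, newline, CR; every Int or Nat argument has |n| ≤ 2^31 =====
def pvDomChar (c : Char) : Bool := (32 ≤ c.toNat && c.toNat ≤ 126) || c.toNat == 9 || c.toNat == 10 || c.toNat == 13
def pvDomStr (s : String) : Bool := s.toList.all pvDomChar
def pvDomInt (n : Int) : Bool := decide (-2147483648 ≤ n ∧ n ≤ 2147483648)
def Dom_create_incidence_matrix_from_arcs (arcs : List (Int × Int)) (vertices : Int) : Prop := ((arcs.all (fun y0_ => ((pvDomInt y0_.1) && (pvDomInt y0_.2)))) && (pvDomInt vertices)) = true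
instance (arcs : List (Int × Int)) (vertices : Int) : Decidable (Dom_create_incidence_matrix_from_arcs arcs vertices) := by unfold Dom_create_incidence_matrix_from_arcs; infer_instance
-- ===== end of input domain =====

-- B builds the incidence matrix column-major (one column per arc, then a transpose into rows)
-- instead of A's scatter-writes into a preallocated row-major zero matrix (objective:
-- alternative decomposition, same cost). Both A and B sort `arcs` in place; the theorems
-- below are about the RETURN value (the sort side effect is identical).

-- ===== PORT A =====
-- incidence_matrix[r][c] = 1 with Python's negative-index wraparound; an out-of-range row index
-- (IndexError) is excluded by Pre_, there pySetD/pyGetD leave the matrix unchanged instead.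
def pvAssign (m : List (List Int)) (r c : Int) : List (List Int) :=
  PySem.List.pySetD m r (PySem.List.pySetD (PySem.List.pyGetD m r []) c 1)

def create_incidence_matrix_from_arcs (arcs : List (Int × Int)) (vertices : Int) : List (List Int) :=
  let s := PySem.List.sorted2 arcs (fun p => p.1) (fun p => p.2)
  let init := (PySem.List.pyRange 0 vertices 1).map (fun _ => List.replicate s.length (0 : Int))
  (PySem.List.enumerate s).foldl (fun m q =>
    let v1 := if q.2.1 = 0 then q.2.1 else q.2.1 - 1
    let v2 := if q.2.2 = 0 then q.2.2 else q.2.2 - 1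
    pvAssign (pvAssign m v1 q.1) v2 q.1) init

-- ===== PORT B =====
-- column[r] = 1 on a [0]*vertices column, Python wraparound; IndexError is outside Pre_ as above
def create_incidence_matrix_from_arcs_alt (arcs : List (Int × Int)) (vertices : Int) : List (List Int) :=
  let s := PySem.List.sorted2 arcs (fun p => p.1) (fun p => p.2)
  let columns := s.foldl (fun cols p =>
    let column := List.replicate vertices.toNat (0 : Int)
    let column := PySem.List.pySetD column (if p.1 = 0 then p.1 else p.1 - 1) 1
    let column := PySem.List.pySetD column (if p.2 = 0 then p.2 else p.2 - 1) 1
    cols ++ [column]) []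
  (PySem.List.pyRange 0 vertices 1).map (fun v =>
    columns.map (fun c => PySem.List.pyGetD c v 0))

-- ===== PRECONDITION & SPEC =====
-- Python's row index for endpoint e: e itself for 0, else e - 1 (spec-side copy, not used by the ports).
def pvMap (e : Int) : Int := if e = 0 then e else e - 1

-- Pre_: exactly the inputs where A returns normally — every mapped endpoint is a valid
-- (possibly negative, wrapping) row index; otherwise A (and B alike) raises IndexError.
def Pre_create_incidence_matrix_from_arcs (arcs : List (Int × Int)) (vertices : Int) : Prop :=
  ∀ p ∈ arcs, (-vertices ≤ pvMap p.1 ∧ pvMap p.1 < vertices) ∧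
              (-vertices ≤ pvMap p.2 ∧ pvMap p.2 < vertices)
instance (arcs : List (Int × Int)) (vertices : Int) : Decidable (Pre_create_incidence_matrix_from_arcs arcs vertices) := by unfold Pre_create_incidence_matrix_from_arcs; infer_instance

def pvWitness_create_incidence_matrix_from_arcs : (List (Int × Int)) × Int := ([(1, 2), (2, 3)], 3)

def Spec_create_incidence_matrix_from_arcs (arcs : List (Int × Int)) (vertices : Int) (out : List (List Int)) : Prop := out = create_incidence_matrix_from_arcs_alt arcs vertices
instance (arcs : List (Int × Int)) (vertices : Int) (out : List (List Int)) : Decidable (Spec_create_incidence_matrix_from_arcs arcs vertices out) := by unfold Spec_create_incidence_matrix_from_arcs; infer_instance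

-- ===== CLAIM (what is proved, stated in full; the proof is below) =====
def Claim_equal_create_incidence_matrix_from_arcs : Prop := ∀ (arcs : List (Int × Int)) (vertices : Int), Dom_create_incidence_matrix_from_arcs arcs vertices → Pre_create_incidence_matrix_from_arcs arcs vertices → Spec_create_incidence_matrix_from_arcs arcs vertices (create_incidence_matrix_from_arcs arcs vertices)

-- ===== LEMMAS AND PROOFS =====

-- Python's wraparound of a negative index on a sequence of length V
def pvWrap (V r : Int) : Int := if r < 0 then r + V else r

theorem pv_setD_wrap {α : Type} (xs : List α) (i : Int) (v : α)
    (h1 : i < 0) (h2 : -(xs.length : Int) ≤ i) :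
    PySem.List.pySetD xs i v = PySem.List.pySetD xs (i + xs.length) v := by
  simp only [PySem.List.pySetD, PySem.List.pySet?, PySem.List.pyIdx?]
  rw [if_neg (by omega), if_pos h2, if_pos (by omega), if_pos (by omega)]
  have h3 : xs.length - (-i).toNat = (i + xs.length).toNat := by omega
  rw [h3]

theorem pv_getD_wrap {α : Type} (xs : List α) (i : Int) (d : α)
    (h1 : i < 0) (h2 : -(xs.length : Int) ≤ i) :
    PySem.List.pyGetD xs i d = PySem.List.pyGetD xs (i + xs.length) d := by
  simp only [PySem.List.pyGetD, PySem.List.pyGet?, PySem.List.pyIdx?]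
  rw [if_neg (by omega), if_pos h2, if_pos (by omega), if_pos (by omega)]
  have h3 : xs.length - (-i).toNat = (i + xs.length).toNat := by omega
  rw [h3]

theorem pv_wrap_bounds (V r : Int) (h : -V ≤ r ∧ r < V) :
    0 ≤ pvWrap V r ∧ pvWrap V r < V := by
  unfold pvWrap; split_ifs <;> omega

-- setting cell r of a dense V-row matrix, written as a map over range(V)
theorem pv_set_map_pyRange (V r : Int) (h0 : 0 ≤ r) (hV : r < V)
    (f : Int → List Int) (x : List Int) :
    ((PySem.List.pyRange 0 V 1).map f).set r.toNat x
      = (PySem.List.pyRange 0 V 1).map (fun v => if v = r then x else f v) := by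
  apply List.ext_getElem
  · simp
  · intro i h1 h2
    rw [List.getElem_set]
    simp only [List.getElem_map, PySem.List.getElem_pyRange_one]
    by_cases hc : (i : Int) = r
    · have : r.toNat = i := by omega
      simp [this, hc]
    · have : r.toNat ≠ i := by omega
      simp [this, hc]

theorem pv_assign_map (V r c : Int) (h0 : 0 ≤ r) (hV : r < V) (f : Int → List Int) :
    pvAssign ((PySem.List.pyRange 0 V 1).map f) r c
      = (PySem.List.pyRange 0 V 1).map
          (fun v => if v = r then PySem.List.pySetD (f v) c 1 else f v) := by
  unfold pvAssign
  rw [PySem.List.pyGetD_map_pyRange_of_nonneg f V r [] h0 hV,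
      PySem.List.pySetD_of_nonneg _ _ h0,
      pv_set_map_pyRange V r h0 hV]
  congr 1
  funext v
  by_cases h : v = r <;> simp [h]

-- the same with a possibly negative (wrapping) row index
theorem pv_assign_map_wrap (V r c : Int) (hb : -V ≤ r ∧ r < V) (f : Int → List Int) :
    pvAssign ((PySem.List.pyRange 0 V 1).map f) r c
      = (PySem.List.pyRange 0 V 1).map
          (fun v => if v = pvWrap V r then PySem.List.pySetD (f v) c 1 else f v) := by
  have hw := pv_wrap_bounds V r hb
  by_cases hneg : r < 0
  · have hlen : (((PySem.List.pyRange 0 V 1).map f).length : Int) = V := by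
      simp; omega
    unfold pvAssign
    rw [pv_setD_wrap _ r _ hneg (by omega), pv_getD_wrap _ r _ hneg (by omega), hlen]
    have : pvWrap V r = r + V := by unfold pvWrap; rw [if_pos hneg]
    rw [this, ← pv_assign_map V (r + V) c (by omega) (by omega) f]
    rfl
  · have : pvWrap V r = r := by unfold pvWrap; rw [if_neg hneg]
    rw [this] at hw ⊢
    rw [pv_assign_map V r c hw.1 hw.2 f]

-- the effect of one arc on one row
def pvRowStep (V v : Int) (row : List Int) (q : Int × (Int × Int)) : List Int :=
  let r1 := if v = pvWrap V (pvMap q.2.1) then PySem.List.pySetD row q.1 1 else row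
  if v = pvWrap V (pvMap q.2.2) then PySem.List.pySetD r1 q.1 1 else r1

theorem pv_fold_map (V : Int) (s : List (Int × Int))
    (hok : ∀ p ∈ s, (-V ≤ pvMap p.1 ∧ pvMap p.1 < V) ∧ (-V ≤ pvMap p.2 ∧ pvMap p.2 < V)) :
    ∀ (k : Int) (f : Int → List Int),
    (PySem.List.enumerate s k).foldl
        (fun m q => pvAssign (pvAssign m (pvMap q.2.1) q.1) (pvMap q.2.2) q.1)
        ((PySem.List.pyRange 0 V 1).map f)
      = (PySem.List.pyRange 0 V 1).map
          (fun v => (PySem.List.enumerate s k).foldl (pvRowStep V v) (f v)) := by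
  induction s with
  | nil => intro k f; simp [PySem.List.enumerate_nil]
  | cons p t ih =>
    intro k f
    have h1 := hok p (by simp)
    rw [PySem.List.enumerate_cons]
    simp only [List.foldl_cons]
    rw [pv_assign_map_wrap V (pvMap p.1) k h1.1 f,
        pv_assign_map_wrap V (pvMap p.2) k h1.2]
    rw [ih (fun q hq => hok q (by simp [hq])) (k + 1)]
    rfl

theorem pv_set_append (pre : List Int) (x y : Int) (rest : List Int) :
    (pre ++ x :: rest).set pre.length y = pre ++ y :: rest := by
  induction pre with
  | nil => rfl
  | cons a t ih => simp [ih]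

theorem pv_row_fold (V v : Int) (s : List (Int × Int)) :
    ∀ (pre : List Int),
    (PySem.List.enumerate s (pre.length : Int)).foldl (pvRowStep V v)
        (pre ++ List.replicate s.length 0)
      = pre ++ s.map (fun p =>
          if v = pvWrap V (pvMap p.1) ∨ v = pvWrap V (pvMap p.2) then (1 : Int) else 0) := by
  induction s with
  | nil => intro pre; simp [PySem.List.enumerate_nil]
  | cons p t ih =>
    intro pre
    rw [PySem.List.enumerate_cons, List.foldl_cons]
    have hstep : pvRowStep V v (pre ++ List.replicate (p :: t).length 0) ((pre.length : Int), p)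
        = pre ++ (if v = pvWrap V (pvMap p.1) ∨ v = pvWrap V (pvMap p.2) then (1 : Int) else 0)
              :: List.replicate t.length 0 := by
      simp only [pvRowStep, List.length_cons, List.replicate_succ]
      by_cases h1 : v = pvWrap V (pvMap p.1) <;> by_cases h2 : v = pvWrap V (pvMap p.2)
      · rw [if_pos h1, if_pos h2]
        simp only [PySem.List.pySetD_natCast, pv_set_append]
        rw [if_pos (Or.inl h1)]
      · rw [if_pos h1, if_neg h2]
        simp only [PySem.List.pySetD_natCast, pv_set_append]
        rw [if_pos (Or.inl h1)]
      · rw [if_neg h1, if_pos h2]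
        simp only [PySem.List.pySetD_natCast, pv_set_append]
        rw [if_pos (Or.inr h2)]
      · rw [if_neg h1, if_neg h2, if_neg (by tauto)]
    rw [hstep]
    have h3 := ih (pre ++ [if v = pvWrap V (pvMap p.1) ∨ v = pvWrap V (pvMap p.2) then (1 : Int) else 0])
    simp only [List.length_append, List.length_cons, List.length_nil, List.append_assoc,
      List.cons_append, List.nil_append, Nat.cast_add, Nat.cast_one] at h3
    rw [List.map_cons]
    exact h3

-- B's incidence column for one arc
def pvCol (V : Int) (p : Int × Int) : List Int :=
  PySem.List.pySetD
    (PySem.List.pySetD (List.replicate V.toNat (0 : Int))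
      (if p.1 = 0 then p.1 else p.1 - 1) 1)
    (if p.2 = 0 then p.2 else p.2 - 1) 1

theorem pv_setD_wrap_len (V r : Int) (xs : List Int) (hlen : (xs.length : Int) = V)
    (hb : -V ≤ r ∧ r < V) :
    PySem.List.pySetD xs r 1 = xs.set (pvWrap V r).toNat 1 := by
  by_cases hneg : r < 0
  · rw [pv_setD_wrap xs r 1 hneg (by omega), hlen,
        PySem.List.pySetD_of_nonneg _ _ (by omega)]
    unfold pvWrap; rw [if_pos hneg]
  · rw [PySem.List.pySetD_of_nonneg _ _ (by omega)]
    unfold pvWrap; rw [if_neg hneg]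

-- entry v of B's column = the dense cell formula
theorem pv_col_get (V v : Int) (p : Int × Int) (hv : 0 ≤ v ∧ v < V)
    (hb : (-V ≤ pvMap p.1 ∧ pvMap p.1 < V) ∧ (-V ≤ pvMap p.2 ∧ pvMap p.2 < V)) :
    PySem.List.pyGetD (pvCol V p) v 0
      = if v = pvWrap V (pvMap p.1) ∨ v = pvWrap V (pvMap p.2) then (1 : Int) else 0 := by
  have hm1 : pvMap p.1 = if p.1 = 0 then p.1 else p.1 - 1 := rfl
  have hm2 : pvMap p.2 = if p.2 = 0 then p.2 else p.2 - 1 := rfl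
  have hw1 := pv_wrap_bounds V (pvMap p.1) hb.1
  have hw2 := pv_wrap_bounds V (pvMap p.2) hb.2
  unfold pvCol
  rw [← hm1, ← hm2]
  rw [pv_setD_wrap_len V (pvMap p.1) _ (by simp; omega) hb.1]
  rw [pv_setD_wrap_len V (pvMap p.2) _ (by simp; omega) hb.2]
  rw [PySem.List.pyGetD_eq_getElem _ _ hv.1 (by simp; omega)]
  rw [List.getElem_set, List.getElem_set, List.getElem_replicate]
  by_cases h2 : v = pvWrap V (pvMap p.2) <;> by_cases h1 : v = pvWrap V (pvMap p.1)
  · rw [if_pos (by omega), if_pos (by left; exact h1)]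
  · rw [if_pos (by omega), if_pos (by right; exact h2)]
  · rw [if_neg (by omega), if_pos (by omega), if_pos (by left; exact h1)]
  · rw [if_neg (by omega), if_neg (by omega), if_neg (by tauto)]

-- ===== VERDICT (by name: the statement is the Claim_ definition above) =====
theorem create_incidence_matrix_from_arcs_spec : Claim_equal_create_incidence_matrix_from_arcs := by
  intro arcs V hdom hpre
  unfold Spec_create_incidence_matrix_from_arcs
  unfold Pre_create_incidence_matrix_from_arcs at hpre
  unfold create_incidence_matrix_from_arcs create_incidence_matrix_from_arcs_alt
  simp only []
  set s := PySem.List.sorted2 arcs (fun p => p.1) (fun p => p.2) with hs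
  have hmem : ∀ p ∈ s, p ∈ arcs := by
    intro p hp
    exact (PySem.List.sorted2_perm arcs (fun p => p.1) (fun p => p.2) false).mem_iff.mp (hs ▸ hp)
  have hok : ∀ p ∈ s, (-V ≤ pvMap p.1 ∧ pvMap p.1 < V) ∧ (-V ≤ pvMap p.2 ∧ pvMap p.2 < V) := by
    intro p hp
    have h := hpre p (hmem p hp)
    unfold pvMap
    unfold pvMap at h
    exact h
  -- B's column loop is a map
  have hcols : s.foldl (fun cols p =>
      let column := List.replicate V.toNat (0 : Int)
      let column := PySem.List.pySetD column (if p.1 = 0 then p.1 else p.1 - 1) 1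
      let column := PySem.List.pySetD column (if p.2 = 0 then p.2 else p.2 - 1) 1
      cols ++ [column]) [] = s.map (pvCol V) := by
    rw [PySem.List.foldl_append_singleton_eq_map]
    rfl
  rw [hcols]
  cases hsnil : s with
  | nil =>
    simp [PySem.List.enumerate_nil]
  | cons p0 t =>
    rw [← hsnil]
    have hp0 : p0 ∈ s := by rw [hsnil]; simp
    have hVpos : 0 < V := by
      have := (hok p0 hp0).1
      omega
    have hfold := pv_fold_map V s hok 0 (fun _ => List.replicate s.length (0 : Int))
    simp only [pvMap] at hfold ⊢
    rw [hfold]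
    apply List.map_congr_left
    intro v hv
    have hvb : 0 ≤ v ∧ v < V := by
      have := PySem.List.mem_pyRange_one.mp hv
      omega
    have hrow := pv_row_fold V v s []
    simp only [List.nil_append, List.length_nil, Nat.cast_zero] at hrow
    rw [hrow, List.map_map]
    apply List.map_congr_left
    intro p hp
    have := pv_col_get V v p hvb (hok p hp)
    simp only [pvMap] at this
    exact (this).symm
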